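-- pv_equiv track=rewrite | github.com/Igor-san/Pythotron | classes/common.py | compare_draws
-- ===== SOURCE A (Python) =====
-- def compare_draws(balls_array1,balls_array2, by_position=False):
--     """ сравним два массива c шарами на количество совпадений
--     balls_array1 и balls_array2 двумерные массивы шаров тиража, а не отдельный тираж!
--     """
--     coins=[]
--     if by_position:
--         for balls1 in balls_array1:
--             len1=len(balls1)
--             for balls2 in balls_array2:
--                 len2=len(balls2)
--                 min_len=min(len1, len2)
--                 one_coin=0
--                 for i in range(min_len):
--                     if balls1[i]==balls2[i]:one_coin+= 1
--
--                 coins.append(one_coin)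
--     else:
--         for balls1 in balls_array1:
--             for balls2 in balls_array2:
--                 one_coin=0
--                 for ball1 in balls1:
--                     for ball2 in balls2:
--                         if ball1==ball2:one_coin+= 1
--
--                 coins.append(one_coin)
--     return coins
--
--     pass #compare_draws
-- ===== SOURCE B (Python) =====
-- def compare_draws(balls_array1, balls_array2, by_position=False):
--     """Same result as A: for every (draw1, draw2) pair, the number of matches.
--     Non-positional branch works on per-draw count dictionaries instead of
--     comparing every ball of one draw with every ball of the other."""
--     if by_position:
--         return [sum(1 for x, y in zip(b1, b2) if x == y)
--                 for b1 in balls_array1 for b2 in balls_array2]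
--     counters2 = []
--     for b2 in balls_array2:
--         c = {}
--         for v in b2:
--             c[v] = c.get(v, 0) + 1
--         counters2.append(c)
--     coins = []
--     for b1 in balls_array1:
--         c1 = {}
--         for v in b1:
--             c1[v] = c1.get(v, 0) + 1
--         for c2 in counters2:
--             coins.append(sum(cnt * c2.get(v, 0) for v, cnt in c1.items()))
--     return coins
-- ===== Notes on version B (the rewrite author's own statement) =====
-- stated objective: alternative
-- what changed: The non-positional branch builds a value-count dictionary once per draw and sums cnt1[v]*cnt2[v] over the first draw's distinct values instead of comparing every ball of one draw with every ball of the other; the positional branch counts equal pairs of zip(b1,b2) instead of an indexed range loop.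
import Mathlib
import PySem

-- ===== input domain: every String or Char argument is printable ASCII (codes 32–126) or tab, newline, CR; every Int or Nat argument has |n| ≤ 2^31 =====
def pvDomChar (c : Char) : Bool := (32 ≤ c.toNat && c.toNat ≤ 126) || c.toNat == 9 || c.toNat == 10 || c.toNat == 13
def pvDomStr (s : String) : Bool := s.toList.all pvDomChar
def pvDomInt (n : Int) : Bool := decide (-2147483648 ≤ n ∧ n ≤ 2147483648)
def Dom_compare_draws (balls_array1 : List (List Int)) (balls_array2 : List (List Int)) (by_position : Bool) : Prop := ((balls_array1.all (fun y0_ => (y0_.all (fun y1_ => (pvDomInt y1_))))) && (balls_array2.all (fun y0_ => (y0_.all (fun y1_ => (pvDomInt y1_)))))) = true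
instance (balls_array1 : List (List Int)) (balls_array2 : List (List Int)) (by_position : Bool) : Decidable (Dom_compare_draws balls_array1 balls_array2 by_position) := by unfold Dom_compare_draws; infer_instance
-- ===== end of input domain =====

-- B replaces A's per-pair ball-by-ball comparison with per-draw count dictionaries
-- (non-positional) and a zip count (positional); objective: alternative algorithm.

-- ===== PORT A =====
-- balls1[i] / balls2[i] with i ∈ range(min_len) is always in range, so pyGetD _ i 0 is exact here.
def compare_draws (balls_array1 : List (List Int)) (balls_array2 : List (List Int)) (by_position : Bool) : List Int :=
  if by_position then
    balls_array1.foldl (fun coins balls1 =>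
      let len1 : Int := balls1.length
      balls_array2.foldl (fun coins balls2 =>
        let len2 : Int := balls2.length
        let min_len := min len1 len2
        let one_coin := (PySem.List.pyRange 0 min_len 1).foldl
          (fun one_coin i =>
            if PySem.List.pyGetD balls1 i 0 = PySem.List.pyGetD balls2 i 0 then one_coin + 1
            else one_coin) 0
        coins ++ [one_coin]) coins) []
  else
    balls_array1.foldl (fun coins balls1 =>
      balls_array2.foldl (fun coins balls2 =>
        let one_coin := balls1.foldl (fun one_coin ball1 =>
          balls2.foldl (fun one_coin ball2 =>
            if ball1 = ball2 then one_coin + 1 else one_coin) one_coin) 0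
        coins ++ [one_coin]) coins) []

-- ===== PORT B =====
-- the plain-dict counting loop of Source B: c[v] = c.get(v, 0) + 1
def pvCounter (l : List Int) : PySem.Dict Int Int :=
  l.foldl (fun d x => d.insert x (d.getD x 0 + 1)) PySem.Dict.empty

def compare_draws_alt (balls_array1 : List (List Int)) (balls_array2 : List (List Int)) (by_position : Bool) : List Int :=
  if by_position then
    balls_array1.flatMap (fun b1 =>
      balls_array2.map (fun b2 => ((b1.zip b2).countP (fun p => p.1 == p.2) : Int)))
  else
    let counters2 := balls_array2.map pvCounter
    balls_array1.flatMap (fun b1 =>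
      let c1 := pvCounter b1
      counters2.map (fun c2 => (c1.items.map (fun p => p.2 * c2.getD p.1 0)).sum))

-- ===== PRECONDITION & SPEC =====
def Spec_compare_draws (balls_array1 : List (List Int)) (balls_array2 : List (List Int)) (by_position : Bool) (out : List Int) : Prop := out = compare_draws_alt balls_array1 balls_array2 by_position
instance (balls_array1 : List (List Int)) (balls_array2 : List (List Int)) (by_position : Bool) (out : List Int) : Decidable (Spec_compare_draws balls_array1 balls_array2 by_position out) := by unfold Spec_compare_draws; infer_instance

-- ===== CLAIM (what is proved, stated in full; the proofs are below) =====
def Claim_equal_compare_draws : Prop := ∀ (balls_array1 : List (List Int)) (balls_array2 : List (List Int)) (by_position : Bool), Dom_compare_draws balls_array1 balls_array2 by_position → Spec_compare_draws balls_array1 balls_array2 by_position (compare_draws balls_array1 balls_array2 by_position)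

-- ===== LEMMAS AND PROOFS =====

-- A's append-into-coins double loop is flatMap/map of the per-pair value.
theorem pv_outer (a1 a2 : List (List Int)) (g : List Int → List Int → Int) :
    a1.foldl (fun coins b1 => a2.foldl (fun coins b2 => coins ++ [g b1 b2]) coins) []
      = a1.flatMap (fun b1 => a2.map (g b1)) := by
  have h1 : (fun (coins : List Int) b1 => a2.foldl (fun coins b2 => coins ++ [g b1 b2]) coins)
      = (fun coins b1 => coins ++ a2.map (g b1)) := by
    funext coins b1
    exact PySem.List.foldl_append_singleton_eq_map (g b1) a2 coins
  rw [h1, PySem.List.foldl_append_eq_flatMap]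
  simp

-- positional per-pair value: range(min_len) index loop = countP over zip
theorem pv_range_countP : ∀ (b1 b2 : List Int),
    (List.range (min b1.length b2.length)).countP (fun i => b1.getD i 0 == b2.getD i 0)
      = (b1.zip b2).countP (fun p => p.1 == p.2) := by
  intro b1
  induction b1 with
  | nil => intro b2; simp
  | cons x t ih =>
    intro b2
    cases b2 with
    | nil => simp
    | cons y s =>
      have hmin : min (x :: t).length (y :: s).length = min t.length s.length + 1 := by
        simp [Nat.succ_min_succ]
      rw [hmin, List.range_succ_eq_map]
      simp only [List.countP_cons, List.countP_map, List.zip_cons_cons]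
      have h : ((fun i => (x :: t).getD i 0 == (y :: s).getD i 0) ∘ Nat.succ)
          = (fun i => t.getD i 0 == s.getD i 0) := by
        funext i; simp
      rw [h, ih s]
      simp [Nat.add_comm]

theorem pv_sum_ite (f : Int → Int) (x : Int) :
    ∀ (S : List Int), S.Nodup → x ∈ S →
      (S.map (fun k => if k = x then f k else 0)).sum = f x := by
  intro S
  induction S with
  | nil => intro _ h; simp at h
  | cons a t ih =>
    intro hnd hmem
    rcases List.mem_cons.mp hmem with h | h
    · subst h
      have hz : (t.map (fun k => if k = x then f k else 0)).sum = 0 := by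
        apply List.sum_eq_zero
        intro y hy
        rcases List.mem_map.mp hy with ⟨k, hk, rfl⟩
        have : k ≠ x := fun he => (List.nodup_cons.mp hnd).1 (he ▸ hk)
        simp [this]
      simp [hz]
    · have hax : a ≠ x := fun he => (List.nodup_cons.mp hnd).1 (he ▸ h)
      simp [hax, ih (List.nodup_cons.mp hnd).2 h]

theorem pv_sum_count (f : Int → Int) (S : List Int) (hnd : S.Nodup) :
    ∀ (l : List Int), (∀ x ∈ l, x ∈ S) →
      (S.map (fun k => ((l.count k : Int)) * f k)).sum = (l.map f).sum := by
  intro l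
  induction l with
  | nil => intro _; simp
  | cons x t ih =>
    intro hcov
    have hx : x ∈ S := hcov x List.mem_cons_self
    have ht : ∀ y ∈ t, y ∈ S := fun y hy => hcov y (List.mem_cons_of_mem x hy)
    have hsplit : (fun k => (((x :: t).count k : Int)) * f k)
        = (fun k => ((t.count k : Int)) * f k + (if k = x then f k else 0)) := by
      funext k
      by_cases hk : k = x
      · simp [hk]; ring
      · have hkx : ¬ x = k := fun he => hk he.symm
        simp [hk, hkx]
    rw [hsplit, PySem.List.sum_map_add_int, ih ht, pv_sum_ite f x S hnd hx]
    rw [List.map_cons, List.sum_cons]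
    ring

theorem pv_nonpos_pair (b1 b2 : List Int) :
    b1.foldl (fun one_coin ball1 =>
        b2.foldl (fun one_coin ball2 =>
          if ball1 = ball2 then one_coin + 1 else one_coin) one_coin) 0
      = ((PySem.Dict.counter b1).items.map (fun p => p.2 * (PySem.Dict.counter b2).getD p.1 0)).sum := by
  have hin : (fun (one_coin : Int) ball1 =>
      b2.foldl (fun one_coin ball2 => if ball1 = ball2 then one_coin + 1 else one_coin) one_coin)
      = (fun one_coin ball1 => one_coin + (b2.count ball1 : Int)) := by
    funext acc x
    have h : (fun (a : Int) y => if x = y then a + 1 else a)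
        = (fun a y => if (fun y => y == x) y = true then a + 1 else a) := by
      funext a y
      by_cases hxy : x = y
      · simp [hxy]
      · have hyx : ¬ y = x := fun hh => hxy hh.symm
        simp [hxy, hyx]
    rw [h, PySem.List.foldl_count_if]
    rfl
  rw [hin, PySem.List.foldl_add]
  rw [PySem.Dict.items_counter, List.map_map]
  have h2 : ((fun p : Int × Int => p.2 * (PySem.Dict.counter b2).getD p.1 0) ∘
      fun k => (k, ((List.count k b1 : Int))))
      = (fun k => ((b1.count k : Int)) * (fun k => (b2.count k : Int)) k) := by
    funext k
    simp [PySem.Dict.getD_counter]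
  rw [h2, pv_sum_count (fun k => (b2.count k : Int)) (PySem.Set.ofList b1) (PySem.Set.nodup_ofList b1) b1
    (fun x hx => (PySem.Set.mem_ofList b1 x).mpr hx)]
  simp

theorem pv_pos_pair (b1 b2 : List Int) :
    (PySem.List.pyRange 0 (min (b1.length : Int) (b2.length : Int)) 1).foldl
      (fun one_coin i =>
        if PySem.List.pyGetD b1 i 0 = PySem.List.pyGetD b2 i 0 then one_coin + 1 else one_coin) 0
      = ((b1.zip b2).countP (fun p => p.1 == p.2) : Int) := by
  rw [show (min (b1.length : Int) (b2.length : Int)) = ((min b1.length b2.length : Nat) : Int) by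
    push_cast; rfl]
  rw [PySem.List.pyRange_zero_natCast, List.foldl_map]
  have h : (fun (one_coin : Int) (k : Nat) =>
      if PySem.List.pyGetD b1 (k : Int) 0 = PySem.List.pyGetD b2 (k : Int) 0 then one_coin + 1
      else one_coin)
      = (fun one_coin k =>
        if (fun i => b1.getD i 0 == b2.getD i 0) k = true then one_coin + 1 else one_coin) := by
    funext a k
    simp [PySem.List.pyGetD_natCast]
  rw [h, PySem.List.foldl_count_if, pv_range_countP]
  simp

-- ===== VERDICT (by name: the statement is the Claim_ definition above) =====
theorem compare_draws_spec : Claim_equal_compare_draws := by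
  intro a1 a2 byp _
  unfold Spec_compare_draws compare_draws compare_draws_alt
  cases byp with
  | true =>
    rw [if_pos rfl, if_pos rfl, pv_outer]
    apply congrArg (fun f => List.flatMap f a1)
    funext b1
    apply congrArg (fun f => List.map f a2)
    funext b2
    exact pv_pos_pair b1 b2
  | false =>
    rw [if_neg (by simp), if_neg (by simp), pv_outer]
    simp only [List.map_map]
    apply congrArg (fun f => List.flatMap f a1)
    funext b1
    apply congrArg (fun f => List.map f a2)
    funext b2
    show _ = ((pvCounter b1).items.map (fun p => p.2 * (pvCounter b2).getD p.1 0)).sum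
    simp only [pvCounter, PySem.Dict.foldl_insert_getD_add_one_eq_counter]
    exact pv_nonpos_pair b1 b2
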